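-- pv_equiv track=rewrite | github.com/THUDM/TreeRL | openrlhf/utils/remote_reward.py | find_repeated_patterns
-- ===== SOURCE A (Python) =====
-- def find_repeated_patterns(s, pattern_length=80, threshold=20):
--     from collections import defaultdict
--     pattern_counts = defaultdict(int)
--
--     for i in range(len(s) - pattern_length + 1):
--         pattern = s[i:i + pattern_length]
--         pattern_counts[pattern] += 1
--
--     repeated_patterns = {pattern: count for pattern, count in pattern_counts.items() if count >= threshold}
--     return repeated_patterns
-- ===== SOURCE B (Python) =====
-- def find_repeated_patterns(s, pattern_length=80, threshold=20):
--     subs = [s[i:i + pattern_length] for i in range(len(s) - pattern_length + 1)]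
--     result = {}
--     seen = set()
--     for p in subs:
--         if p not in seen:
--             seen.add(p)
--             c = subs.count(p)
--             if c >= threshold:
--                 result[p] = c
--     return result
-- ===== Notes on version B (the rewrite author's own statement) =====
-- stated objective: alternative
-- what changed: Replaces the defaultdict counting pass plus dict-comprehension filter by a dict-free scan: materialise the substring list once, then for each first occurrence of a pattern (tracked with a set) count it with list.count and emit it immediately if the count reaches the threshold.
import Mathlib
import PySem

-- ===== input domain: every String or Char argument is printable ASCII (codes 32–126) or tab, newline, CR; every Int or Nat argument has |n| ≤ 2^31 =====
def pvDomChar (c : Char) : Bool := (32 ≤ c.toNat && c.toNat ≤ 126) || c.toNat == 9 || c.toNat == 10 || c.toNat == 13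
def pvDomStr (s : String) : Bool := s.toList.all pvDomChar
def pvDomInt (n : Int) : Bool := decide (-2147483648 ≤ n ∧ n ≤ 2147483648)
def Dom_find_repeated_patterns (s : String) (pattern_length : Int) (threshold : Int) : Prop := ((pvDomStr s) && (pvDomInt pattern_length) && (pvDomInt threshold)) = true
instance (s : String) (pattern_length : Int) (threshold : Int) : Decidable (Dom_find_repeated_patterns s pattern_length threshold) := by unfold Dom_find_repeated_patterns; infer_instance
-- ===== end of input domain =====

-- ===== PORT A =====
-- Port of A: one counting pass over all window starts into a defaultdict, then filter its items.
def find_repeated_patterns (s : String) (pattern_length : Int) (threshold : Int) : List (String × Int) :=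
  let pattern_counts : PySem.Dict String Int :=
    (PySem.List.pyRange 0 (PySem.Str.len s - pattern_length + 1) 1).foldl
      (fun d i => d.modify (PySem.Str.slice s (some i) (some (i + pattern_length))) 0 (· + 1))
      PySem.Dict.empty
  pattern_counts.items.filter (fun pc => threshold ≤ pc.2)

-- ===== PORT B =====
-- Port of B: build the substring list, then a dict-free scan with a seen-set; each first
-- occurrence is counted with list.count and emitted at once if it reaches the threshold.
-- pvStep is the body of B's `for p in subs` loop.
def pvStep (subs : List String) (threshold : Int)
    (st : PySem.Set String × List (String × Int)) (p : String) :
    PySem.Set String × List (String × Int) :=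
  if st.1.contains p then st
  else
    let c : Int := (PySem.List.count subs p : Nat)
    (st.1.add p, if threshold ≤ c then st.2 ++ [(p, c)] else st.2)

def find_repeated_patterns_alt (s : String) (pattern_length : Int) (threshold : Int) : List (String × Int) :=
  let subs : List String :=
    (PySem.List.pyRange 0 (PySem.Str.len s - pattern_length + 1) 1).map
      (fun i => PySem.Str.slice s (some i) (some (i + pattern_length)))
  (subs.foldl (pvStep subs threshold) (PySem.Set.empty, [])).2

-- ===== PRECONDITION & SPEC =====
def Spec_find_repeated_patterns (s : String) (pattern_length : Int) (threshold : Int) (out : List (String × Int)) : Prop := out = find_repeated_patterns_alt s pattern_length threshold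
instance (s : String) (pattern_length : Int) (threshold : Int) (out : List (String × Int)) : Decidable (Spec_find_repeated_patterns s pattern_length threshold out) := by unfold Spec_find_repeated_patterns; infer_instance

-- ===== CLAIM (what is proved, stated in full; the proofs are below) =====
def Claim_equal_find_repeated_patterns : Prop := ∀ (s : String) (pattern_length : Int) (threshold : Int), Dom_find_repeated_patterns s pattern_length threshold → Spec_find_repeated_patterns s pattern_length threshold (find_repeated_patterns s pattern_length threshold)

-- ===== LEMMAS AND PROOFS =====

-- First-occurrence dedup of `l`, skipping anything already in `seen`.
def pvSdedup {α : Type} [BEq α] : List α → List α → List α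
  | [], _ => []
  | x :: xs, seen => if seen.contains x then pvSdedup xs seen else x :: pvSdedup xs (seen ++ [x])

theorem pvFoldlAdd_eq_sdedup {α : Type} [BEq α] (l : List α) (acc : List α) :
    List.foldl PySem.Set.add acc l = acc ++ pvSdedup l acc := by
  induction l generalizing acc with
  | nil => simp [pvSdedup]
  | cons x xs ih =>
    simp only [List.foldl_cons, pvSdedup, PySem.Set.add, PySem.Set.contains]
    by_cases h : List.contains acc x
    · simp only [h, if_true, ih acc]
    · simp only [h, Bool.false_eq_true, if_false, ih (acc ++ [x]), List.append_assoc,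
        List.singleton_append]

theorem pvStep_mem (subs : List String) (t : Int) (seen : PySem.Set String)
    (out : List (String × Int)) (x : String) (h : List.contains seen x = true) :
    pvStep subs t (seen, out) x = (seen, out) := by
  have hm : x ∈ seen := by simpa using h
  simp [pvStep, PySem.Set.contains, hm]

theorem pvStep_new (subs : List String) (t : Int) (seen : PySem.Set String)
    (out : List (String × Int)) (x : String) (h : List.contains seen x = false) :
    pvStep subs t (seen, out) x
      = (seen ++ [x],
         if t ≤ ((PySem.List.count subs x : Nat) : Int)
         then out ++ [(x, ((PySem.List.count subs x : Nat) : Int))] else out) := by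
  have hm : x ∉ seen := by simpa using h
  simp [pvStep, PySem.Set.contains, PySem.Set.add, hm]

theorem pvLoop_eq (subs : List String) (t : Int) :
    ∀ (l : List String) (seen : PySem.Set String) (out : List (String × Int)),
    (l.foldl (pvStep subs t) (seen, out)).2
    = out ++ ((pvSdedup l seen).map
        (fun k => (k, ((PySem.List.count subs k : Nat) : Int)))).filter (fun pc => t ≤ pc.2) := by
  intro l
  induction l with
  | nil => intro seen out; simp [pvSdedup]
  | cons x xs ih =>
    intro seen out
    rw [List.foldl_cons]
    by_cases h : List.contains seen x = true
    · rw [pvStep_mem subs t seen out x h, ih seen out]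
      simp only [pvSdedup, h, if_true]
    · have h' : List.contains seen x = false := by simpa using h
      rw [pvStep_new subs t seen out x h']
      have hm : x ∉ seen := by simpa using h'
      have hsd : pvSdedup (x :: xs) seen = x :: pvSdedup xs (seen ++ [x]) := by
        simp [pvSdedup, hm]
      rw [hsd]
      by_cases hc : t ≤ ((PySem.List.count subs x : Nat) : Int)
      · have hc' : t ≤ ((List.count x subs : Nat) : Int) := by simpa [PySem.List.count] using hc
        rw [if_pos hc, ih (seen ++ [x])]
        simp [hc', PySem.List.count, List.append_assoc]
      · have hc' : ¬ t ≤ ((List.count x subs : Nat) : Int) := by simpa [PySem.List.count] using hc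
        rw [if_neg hc, ih (seen ++ [x])]
        simp [hc', PySem.List.count]

-- ===== VERDICT (by name: the statement is the Claim_ definition above) =====
theorem find_repeated_patterns_spec : Claim_equal_find_repeated_patterns := by
  intro s pattern_length threshold _
  unfold Spec_find_repeated_patterns find_repeated_patterns find_repeated_patterns_alt
  dsimp only
  rw [pvLoop_eq]
  rw [← List.foldl_map
    (f := fun i => PySem.Str.slice s (some i) (some (i + pattern_length)))
    (g := fun (d : PySem.Dict String Int) p => d.modify p 0 (· + 1))]
  rw [show (List.foldl (fun (d : PySem.Dict String Int) p => d.modify p 0 (· + 1))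
      PySem.Dict.empty
      ((PySem.List.pyRange 0 (PySem.Str.len s - pattern_length + 1) 1).map
        (fun i => PySem.Str.slice s (some i) (some (i + pattern_length))))
      = PySem.Dict.counter _) from rfl]
  rw [PySem.Dict.items_counter]
  rw [show (PySem.Set.ofList ((PySem.List.pyRange 0 (PySem.Str.len s - pattern_length + 1) 1).map
        (fun i => PySem.Str.slice s (some i) (some (i + pattern_length))))
      = pvSdedup _ PySem.Set.empty) from by
    simpa [PySem.Set.ofList, PySem.Set.empty] using
      pvFoldlAdd_eq_sdedup ((PySem.List.pyRange 0 (PySem.Str.len s - pattern_length + 1) 1).map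
        (fun i => PySem.Str.slice s (some i) (some (i + pattern_length)))) []]
  simp [PySem.List.count]
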